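-- pv_equiv track=rewrite | github.com/pari0130/ALGORITHM | PYTHON/ZZ.코테/01. 오늘의집/3. tmp.py | longest_happiness_period2
-- ===== SOURCE A (Python) =====
-- def longest_happiness_period2(happiness):
--     max_period = 0
--     current_period = 0
--     happy_days = 0
--     for score in happiness:
--         if score > 8:
--             happy_days += 1
--             current_period += 1
--             if current_period > max_period and happy_days > (current_period / 2):
--                 max_period = current_period
--         else:
--             current_period = 0
--             happy_days = 0
--     return max_period
-- ===== SOURCE B (Python) =====
-- from itertools import groupby
--
-- def longest_happiness_period2(happiness):
--     return max((sum(1 for _ in g)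
--                 for k, g in groupby(happiness, key=lambda s: s > 8) if k),
--                default=0)
-- ===== Notes on version B (the rewrite author's own statement) =====
-- stated objective: idiomatic
-- what changed: Replaced the manual three-counter loop (whose happy_days/half-period condition is always true) by grouping consecutive scores with itertools.groupby on the key score>8 and taking the max length of the True groups (default 0).
import Mathlib
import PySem

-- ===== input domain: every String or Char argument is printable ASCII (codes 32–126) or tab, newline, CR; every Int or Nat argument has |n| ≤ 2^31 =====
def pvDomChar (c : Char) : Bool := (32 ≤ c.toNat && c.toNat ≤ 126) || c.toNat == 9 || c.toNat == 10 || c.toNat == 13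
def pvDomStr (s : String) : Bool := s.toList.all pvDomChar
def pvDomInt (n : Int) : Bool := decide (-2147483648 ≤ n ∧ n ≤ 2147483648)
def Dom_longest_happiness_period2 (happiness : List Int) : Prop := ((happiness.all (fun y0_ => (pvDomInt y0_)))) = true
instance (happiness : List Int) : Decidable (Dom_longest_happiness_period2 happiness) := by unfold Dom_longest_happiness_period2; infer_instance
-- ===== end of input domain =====

-- B replaces A's manual three-counter loop (whose happy_days half-condition is always true)
-- by itertools.groupby on the key score>8 and a max over the lengths of the True groups.

-- ===== PORT A =====
-- loop body of A; the Python comparison happy_days > current_period/2 is true division on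
-- ints, which is exactly 2*happy_days > current_period over Int (both sides integers).
def stepA (st : Int × Int × Int) (score : Int) : Int × Int × Int :=
  let (max_period, current_period, happy_days) := st
  if score > 8 then
    let happy_days := happy_days + 1
    let current_period := current_period + 1
    if current_period > max_period ∧ 2 * happy_days > current_period then
      (current_period, current_period, happy_days)
    else
      (max_period, current_period, happy_days)
  else
    (max_period, 0, 0)

def longest_happiness_period2 (happiness : List Int) : Int :=
  (happiness.foldl stepA (0, 0, 0)).1

-- ===== PORT B =====
-- hand port of itertools.groupby(·, key = fun s => s > 8): takeRun consumes the current
-- group (all leading elements whose key equals k) and returns its length and the remainder.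
def takeRun (k : Bool) : List Int → Nat × List Int
  | [] => (0, [])
  | x :: xs =>
    if decide (x > 8) = k then
      ((takeRun k xs).1 + 1, (takeRun k xs).2)
    else (0, x :: xs)

theorem takeRun_snd_length_le (k : Bool) (l : List Int) : ((takeRun k l).2).length ≤ l.length := by
  induction l with
  | nil => simp [takeRun]
  | cons x xs ih =>
    simp only [takeRun]
    split
    · simpa using Nat.le_succ_of_le ih
    · simp

-- max over the lengths of the True-key groups (Python's max(..., default=0))
def groupsMax : List Int → Int
  | [] => 0
  | x :: xs =>
    let k := decide (x > 8)
    max (if k then ((takeRun k xs).1 + 1 : Int) else 0) (groupsMax (takeRun k xs).2)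
  termination_by l => l.length
  decreasing_by
    exact Nat.lt_succ_of_le (takeRun_snd_length_le _ xs)

def longest_happiness_period2_alt (happiness : List Int) : Int :=
  groupsMax happiness

-- ===== PRECONDITION & SPEC =====
def Spec_longest_happiness_period2 (happiness : List Int) (out : Int) : Prop := out = longest_happiness_period2_alt happiness
instance (happiness : List Int) (out : Int) : Decidable (Spec_longest_happiness_period2 happiness out) := by unfold Spec_longest_happiness_period2; infer_instance

-- ===== CLAIM (what is proved, stated in full; the proofs are below) =====
def Claim_equal_longest_happiness_period2 : Prop := ∀ (happiness : List Int), Dom_longest_happiness_period2 happiness → Spec_longest_happiness_period2 happiness (longest_happiness_period2 happiness)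

-- ===== LEMMAS AND PROOFS =====

-- takeRun splits off exactly a maximal prefix of key-k elements
theorem takeRun_split (k : Bool) (l : List Int) :
    ∃ t, l = t ++ (takeRun k l).2 ∧ (takeRun k l).1 = t.length ∧
      (∀ x ∈ t, decide (x > 8) = k) ∧
      (∀ y ys, (takeRun k l).2 = y :: ys → decide (y > 8) ≠ k) := by
  induction l with
  | nil => exact ⟨[], by simp [takeRun]⟩
  | cons x xs ih =>
    by_cases hx : decide (x > 8) = k
    · obtain ⟨t, ht1, ht2, ht3, ht4⟩ := ih
      refine ⟨x :: t, ?_, ?_, ?_, ?_⟩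
      · simp only [takeRun, if_pos hx, List.cons_append]
        exact congrArg (List.cons x) ht1
      · simp [takeRun, hx, ht2]
      · intro z hz
        rcases List.mem_cons.mp hz with h | h
        · subst h; exact hx
        · exact ht3 z h
      · simpa only [takeRun, if_pos hx] using ht4
    · exact ⟨[], by simp [takeRun, hx], by simp [takeRun, hx], by simp,
        by intro y ys h; simp only [takeRun, if_neg hx] at h
           injection h with h1 h2; subst h1; exact hx⟩

-- folding stepA over a run of happy scores from a consistent state (happy = current, 0 ≤ c ≤ m)
theorem foldA_true_run (t : List Int) : ∀ (m c : Int), 0 ≤ c → c ≤ m → (∀ x ∈ t, x > 8) →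
    t.foldl stepA (m, c, c) = (max m (c + t.length), c + t.length, c + t.length) := by
  induction t with
  | nil =>
    intro m c hc hcm _
    simp only [List.foldl_nil, List.length_nil, Int.natCast_zero, add_zero]
    rw [max_eq_left hcm]
  | cons x xs ih =>
    intro m c hc hcm hall
    have hx : x > 8 := hall x (by simp)
    have hxs : ∀ y ∈ xs, y > 8 := fun y hy => hall y (by simp [hy])
    have h2 : 2 * (c + 1) > c + 1 := by omega
    simp only [List.foldl_cons, stepA, if_pos hx, h2, and_true]
    by_cases hcm1 : c + 1 > m
    · rw [if_pos hcm1, ih (c+1) (c+1) (by omega) le_rfl hxs]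
      simp only [List.length_cons, Prod.mk.injEq]
      push_cast
      refine ⟨?_, ?_, ?_⟩ <;> omega
    · rw [if_neg hcm1, ih m (c+1) (by omega) (by omega) hxs]
      simp only [List.length_cons, Prod.mk.injEq]
      push_cast
      refine ⟨?_, ?_, ?_⟩ <;> omega

-- folding stepA over unhappy scores keeps the max and stays reset
theorem foldA_false_run (t : List Int) (m : Int) (hall : ∀ x ∈ t, ¬ x > 8) :
    t.foldl stepA (m, 0, 0) = (m, 0, 0) := by
  induction t with
  | nil => rfl
  | cons x xs ih =>
    have hx := hall x (by simp)
    simp only [List.foldl_cons, stepA, if_neg hx]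
    exact ih (fun y hy => hall y (by simp [hy]))

theorem groupsMax_nonneg_aux : ∀ (n : Nat) (l : List Int), l.length ≤ n → 0 ≤ groupsMax l := by
  intro n
  induction n with
  | zero =>
    intro l hl
    have : l = [] := List.eq_nil_of_length_eq_zero (Nat.le_zero.mp hl)
    subst this; simp [groupsMax]
  | succ n ih =>
    intro l hl
    match l with
    | [] => simp [groupsMax]
    | x :: xs =>
      rw [groupsMax]
      refine le_max_of_le_right (ih _ ?_)
      have := takeRun_snd_length_le (decide (x > 8)) xs
      simp at hl; omega

theorem groupsMax_nonneg (l : List Int) : 0 ≤ groupsMax l :=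
  groupsMax_nonneg_aux l.length l le_rfl

theorem main_lemma : ∀ (n : Nat) (l : List Int) (m : Int), l.length ≤ n → 0 ≤ m →
    (l.foldl stepA (m, 0, 0)).1 = max m (groupsMax l) := by
  intro n
  induction n with
  | zero =>
    intro l m hl hm
    have : l = [] := List.eq_nil_of_length_eq_zero (Nat.le_zero.mp hl)
    subst this
    simp [groupsMax, max_eq_left hm]
  | succ n ih =>
    intro l m hl hm
    match l with
    | [] => simp [groupsMax, max_eq_left hm]
    | x :: xs =>
      by_cases hx : x > 8
      · -- first group is a happy run of length (takeRun true xs).1 + 1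
        obtain ⟨t, ht1, ht2, ht3, ht4⟩ := takeRun_split true xs
        set r := (takeRun true xs).2 with hr
        have hth : ∀ y ∈ t, y > 8 := fun y hy => by simpa using ht3 y hy
        have hrun := foldA_true_run t (max m 1) 1 (by omega) (le_max_right m 1) hth
        have hstep : stepA (m, 0, 0) x = (max m 1, 1, 1) := by
          simp only [stepA, if_pos hx, zero_add]
          split_ifs with h
          · rw [max_eq_right (by omega : m ≤ 1)]
          · rw [max_eq_left (by omega : (1:Int) ≤ m)]
        have hGM : groupsMax (x :: xs) = max ((t.length : Int) + 1) (groupsMax r) := by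
          rw [groupsMax]
          simp only [decide_eq_true hx, if_pos, ht2, ← hr]
        have hxsn : xs.length ≤ n := by simpa using hl
        have hrle : r.length ≤ xs.length := hr ▸ takeRun_snd_length_le true xs
        have hres : ∀ M : Int, 0 ≤ M →
            (r.foldl stepA (M, (1:Int) + t.length, (1:Int) + t.length)).1
              = max M (groupsMax r) := by
          intro M hM
          match hrc : r with
          | [] => simp [groupsMax, max_eq_left hM]
          | y :: ys =>
            have hy : ¬ y > 8 := by
              have := ht4 y ys rfl
              simpa using this
            have hylen : ys.length ≤ n := by simp at hrle; omega
            obtain ⟨t2, h21, h22, h23, h24⟩ := takeRun_split false ys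
            have hGMy : groupsMax (y :: ys) = groupsMax ((takeRun false ys).2) := by
              rw [groupsMax]
              simp only [decide_eq_false hy]
              norm_num
              exact groupsMax_nonneg _
            have h2f : ∀ z ∈ t2, ¬ z > 8 := fun z hz => by simpa using h23 z hz
            have hstep2 : stepA (M, (1:Int) + t.length, (1:Int) + t.length) y = (M, 0, 0) := by
              simp [stepA, if_neg hy]
            have h2len : ((takeRun false ys).2).length ≤ n :=
              le_trans (takeRun_snd_length_le false ys) hylen
            rw [List.foldl_cons, hstep2, hGMy]
            conv_lhs => rw [h21]
            rw [List.foldl_append, foldA_false_run t2 M h2f]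
            exact ih _ M h2len hM
        rw [List.foldl_cons, hstep]
        conv_lhs => rw [ht1]
        rw [List.foldl_append, hrun,
          hres (max (max m 1) ((1:Int) + t.length))
            (le_max_of_le_left (le_max_of_le_left hm)), hGM]
        rw [max_assoc m 1, max_eq_right (by omega : (1:Int) ≤ 1 + (t.length : Int)),
          max_assoc, add_comm (1:Int) (t.length : Int)]
      · -- first group is unhappy: strip it, max unchanged
        obtain ⟨t, ht1, ht2, ht3, ht4⟩ := takeRun_split false xs
        set r := (takeRun false xs).2 with hr
        have hth : ∀ y ∈ t, ¬ y > 8 := fun y hy => by simpa using ht3 y hy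
        have hstep : stepA (m, 0, 0) x = (m, 0, 0) := by simp [stepA, if_neg hx]
        have hGM : groupsMax (x :: xs) = groupsMax r := by
          rw [groupsMax]
          simp only [decide_eq_false hx, ← hr]
          norm_num
          exact groupsMax_nonneg _
        have hrl : r.length ≤ n := by
          have := hr ▸ takeRun_snd_length_le false xs
          simp at hl; omega
        rw [List.foldl_cons, hstep]
        conv_lhs => rw [ht1]
        rw [List.foldl_append, foldA_false_run t m hth, hGM]
        exact ih r m hrl hm

-- ===== VERDICT (by name: the statement is the Claim_ definition above) =====
theorem longest_happiness_period2_spec : Claim_equal_longest_happiness_period2 := by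
  intro happiness _
  unfold Spec_longest_happiness_period2 longest_happiness_period2 longest_happiness_period2_alt
  rw [main_lemma happiness.length happiness 0 le_rfl le_rfl]
  have := groupsMax_nonneg happiness
  omega
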